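-- pv_equiv track=rewrite | github.com/witoldzol/python_fundamentals | format_duration.py | print_duration
-- ===== SOURCE A (Python) =====
-- def print_duration(durations):
--     output = ''
--
--     for i, k in enumerate(durations):
--         time_chunk = f'{durations[k]} {k}'
--
--         if durations[k] > 1:
--             time_chunk += 's'
--
--         if i == (len(durations) - 2):
--             time_chunk += ' and '
--         elif i < (len(durations) - 2):
--             time_chunk += ', '
--
--         output += time_chunk
--     return output
-- ===== SOURCE B (Python) =====
-- def print_duration(durations):
--     # Build the string BACK-TO-FRONT: walk the keys in reverse, prepending each
--     # formatted piece; the separator is a tiny state machine ('' -> ' and ' -> ', ')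
--     # so no length/index arithmetic is ever needed.
--     out = ''
--     sep = ''
--     for k in reversed(list(durations)):
--         v = durations[k]
--         piece = f'{v} {k}' + ('s' if v > 1 else '')
--         out = piece + sep + out
--         sep = ' and ' if sep == '' else ', '
--     return out
-- ===== Notes on version B (the rewrite author's own statement) =====
-- stated objective: alternative
-- what changed: B traverses the keys in REVERSE, prepending each piece to the result, and picks the separator with a two-step state machine ('' -> ' and ' -> ', ') carried in the loop state, eliminating A's index/length comparisons entirely.
import Mathlib
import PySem

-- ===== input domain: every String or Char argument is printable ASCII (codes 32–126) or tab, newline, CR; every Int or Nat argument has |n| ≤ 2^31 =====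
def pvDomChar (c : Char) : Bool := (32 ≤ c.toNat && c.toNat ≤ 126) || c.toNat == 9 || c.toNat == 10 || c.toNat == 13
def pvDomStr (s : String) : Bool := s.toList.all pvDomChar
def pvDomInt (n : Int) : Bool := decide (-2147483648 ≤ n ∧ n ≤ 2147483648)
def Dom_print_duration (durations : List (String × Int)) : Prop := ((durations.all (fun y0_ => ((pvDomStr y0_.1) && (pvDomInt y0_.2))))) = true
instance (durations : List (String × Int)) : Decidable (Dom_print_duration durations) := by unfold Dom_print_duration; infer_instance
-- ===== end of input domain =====

-- B builds the string back-to-front over the reversed key list, choosing separators with a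
-- two-step state machine carried in the loop state, instead of A's per-index length arithmetic.


-- ===== PORT A =====
-- 'durations' is a Python dict: the assoc list is normalised with PySem.Dict.ofList
-- (insertion order, last value wins), exactly as Python builds the dict the code iterates.
def print_duration (durations : List (String × Int)) : String :=
  let d := PySem.Dict.ofList durations
  (PySem.List.enumerate d.keys).foldl
    (fun output ik =>
      let i := ik.1
      let k := ik.2
      let time_chunk := PySem.Int.toStr (d.getD k 0) ++ " " ++ k
      let time_chunk := if d.getD k 0 > 1 then time_chunk ++ "s" else time_chunk
      let time_chunk :=
        if i = (d.size : Int) - 2 then time_chunk ++ " and "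
        else if i < (d.size : Int) - 2 then time_chunk ++ ", "
        else time_chunk
      output ++ time_chunk) ""

-- ===== PORT B =====
def print_duration_alt (durations : List (String × Int)) : String :=
  let d := PySem.Dict.ofList durations
  let r := d.keys.reverse.foldl
    (fun (st : String × String) k =>
      let v := d.getD k 0
      let piece := PySem.Int.toStr v ++ " " ++ k ++ (if v > 1 then "s" else "")
      (piece ++ st.2 ++ st.1, if st.2 = "" then " and " else ", ")) ("", "")
  r.1

-- ===== PRECONDITION & SPEC =====
def Spec_print_duration (durations : List (String × Int)) (out : String) : Prop := out = print_duration_alt durations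
instance (durations : List (String × Int)) (out : String) : Decidable (Spec_print_duration durations out) := by unfold Spec_print_duration; infer_instance

-- ===== CLAIM (what is proved, stated in full; the proofs are below) =====
def Claim_equal_print_duration : Prop := ∀ (durations : List (String × Int)), Dom_print_duration durations → Spec_print_duration durations (print_duration durations)

-- ===== LEMMAS AND PROOFS =====

-- chunk functions: pvC is A's shape ("s" appended after the if), pvC2 is B's shape ("s" inside)
def pvC (d : PySem.Dict String Int) (k : String) : String :=
  if d.getD k 0 > 1
  then PySem.Int.toStr (d.getD k 0) ++ " " ++ k ++ "s"
  else PySem.Int.toStr (d.getD k 0) ++ " " ++ k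

def pvC2 (d : PySem.Dict String Int) (k : String) : String :=
  PySem.Int.toStr (d.getD k 0) ++ " " ++ k ++ (if d.getD k 0 > 1 then "s" else "")

-- canonical "pieces with separators" form both ports are reduced to
def pvT (c : String → String) : List String → String
  | [] => ""
  | a :: l => c a ++ (if l.length = 0 then "" else if l.length = 1 then " and " else ", ") ++ pvT c l

-- the separator state B's loop carries after consuming a (reversed) suffix
def pvS : List String → String
  | [] => ""
  | [_] => " and "
  | _ :: _ :: _ => ", "

theorem pvT_congr (c c' : String → String) (h : ∀ x, c x = c' x) :
    ∀ l, pvT c l = pvT c' l := by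
  intro l
  induction l with
  | nil => rfl
  | cons a l ih => simp [pvT, h, ih]

-- A's loop, generalised over the chunk function and start index
theorem fold_sep (c : String → String) (n : Int) :
    ∀ (l : List String) (s : Int) (acc : String), s + (l.length : Int) = n →
    (PySem.List.enumerate l s).foldl
      (fun output ik =>
        output ++
          (if ik.1 = n - 2 then c ik.2 ++ " and "
           else if ik.1 < n - 2 then c ik.2 ++ ", "
           else c ik.2)) acc
    = acc ++ pvT c l := by
  intro l
  induction l with
  | nil => intro s acc h; simp [PySem.List.enumerate_nil, pvT]
  | cons a l ih =>
      intro s acc h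
      simp only [List.length_cons] at h
      push_cast at h
      rw [PySem.List.enumerate_cons, List.foldl_cons,
          ih (s + 1) _ (by omega)]
      simp only [pvT]
      by_cases h1 : l.length = 1
      · have hs : s = n - 2 := by omega
        simp [h1, hs, String.append_assoc]
      · by_cases h0 : l.length = 0
        · have hs1 : ¬ (s = n - 2) := by omega
          have hs2 : ¬ (s < n - 2) := by omega
          simp [h0, hs1, hs2, String.append_assoc]
        · have hs1 : s ≠ n - 2 := by omega
          have hs2 : s < n - 2 := by omega
          simp [h0, h1, hs1, hs2, String.append_assoc]

-- B's reverse loop, rephrased as a foldr over the original key list: it computes the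
-- canonical form together with the separator state.
theorem foldr_state (c : String → String) :
    ∀ l : List String,
      l.foldr
        (fun k (st : String × String) =>
          (c k ++ st.2 ++ st.1, if st.2 = "" then " and " else ", ")) ("", "")
      = (pvT c l, pvS l) := by
  intro l
  induction l with
  | nil => rfl
  | cons a l ih =>
      rw [List.foldr_cons, ih]
      match l with
      | [] => simp [pvT, pvS]
      | [b] => simp [pvT, pvS]
      | b :: d :: m => simp [pvT, pvS]

-- ===== VERDICT (by name: the statement is the Claim_ definition above) =====
theorem print_duration_spec : Claim_equal_print_duration := by
  intro durations _
  unfold Spec_print_duration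
  have hlen : (0 : Int) + (((PySem.Dict.ofList durations).keys).length : Int)
      = (((PySem.Dict.ofList durations).size) : Int) := by
    simp [PySem.Dict.keys, PySem.Dict.size]
  have hA2 : print_duration durations
      = "" ++ pvT (pvC (PySem.Dict.ofList durations)) (PySem.Dict.ofList durations).keys :=
    fold_sep (pvC (PySem.Dict.ofList durations)) ((PySem.Dict.ofList durations).size : Int)
      (PySem.Dict.ofList durations).keys 0 "" hlen
  have hB2 : print_duration_alt durations
      = pvT (pvC2 (PySem.Dict.ofList durations)) (PySem.Dict.ofList durations).keys := by
    rw [show print_duration_alt durations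
        = ((PySem.Dict.ofList durations).keys.reverse.foldl
            (fun (st : String × String) k =>
              (pvC2 (PySem.Dict.ofList durations) k ++ st.2 ++ st.1,
               if st.2 = "" then " and " else ", ")) ("", "")).1 from rfl,
      List.foldl_reverse]
    exact congrArg Prod.fst (foldr_state (pvC2 (PySem.Dict.ofList durations)) _)
  have hcc : ∀ k, pvC (PySem.Dict.ofList durations) k = pvC2 (PySem.Dict.ofList durations) k := by
    intro k
    by_cases h : (PySem.Dict.ofList durations).getD k 0 > 1 <;> simp [pvC, pvC2, h]
  rw [hA2, hB2, pvT_congr _ _ hcc]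
  simp
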